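-- pv_equiv track=rewrite | github.com/kevinngzh/advent-of-code-2020 | advent_of_code_2020/day24/__init__.py | get_tile_coordinates
-- ===== SOURCE A (Python) =====
-- HEX_DIRECTIONS = {
--     "nw": (0, -1),
--     "ne": (1, -1),
--     "w": (-1, 0),
--     "e": (1, 0),
--     "sw": (-1, 1),
--     "se": (0, 1),
-- }
--
-- def get_tile_coordinates(tile_directions):
--     x = 0
--     y = 0
--
--     for direction in tile_directions:
--         i, j = HEX_DIRECTIONS[direction]
--
--         x += i
--         y += j
--
--     # `x`, `y` at the end of the `for` loop is the tile we're interested in.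
--     return x, y
-- ===== SOURCE B (Python) =====
-- HEX_DIRECTIONS = {
--     "nw": (0, -1),
--     "ne": (1, -1),
--     "w": (-1, 0),
--     "e": (1, 0),
--     "sw": (-1, 1),
--     "se": (0, 1),
-- }
--
-- def get_tile_coordinates(tile_directions):
--     # Count each of the six directions once, then combine the counts
--     # with the fixed unit vectors (closed-form weighted sum, no running accumulator).
--     ne = tile_directions.count("ne")
--     nw = tile_directions.count("nw")
--     se = tile_directions.count("se")
--     sw = tile_directions.count("sw")
--     e = tile_directions.count("e")
--     w = tile_directions.count("w")
--     return (ne + e - w - sw, se + sw - nw - ne)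
-- ===== Notes on version B (the rewrite author's own statement) =====
-- stated objective: alternative
-- what changed: B replaces the single accumulating loop over direction vectors by a frequency count of the six direction tokens followed by one closed-form weighted combination of those counts.
import Mathlib
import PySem

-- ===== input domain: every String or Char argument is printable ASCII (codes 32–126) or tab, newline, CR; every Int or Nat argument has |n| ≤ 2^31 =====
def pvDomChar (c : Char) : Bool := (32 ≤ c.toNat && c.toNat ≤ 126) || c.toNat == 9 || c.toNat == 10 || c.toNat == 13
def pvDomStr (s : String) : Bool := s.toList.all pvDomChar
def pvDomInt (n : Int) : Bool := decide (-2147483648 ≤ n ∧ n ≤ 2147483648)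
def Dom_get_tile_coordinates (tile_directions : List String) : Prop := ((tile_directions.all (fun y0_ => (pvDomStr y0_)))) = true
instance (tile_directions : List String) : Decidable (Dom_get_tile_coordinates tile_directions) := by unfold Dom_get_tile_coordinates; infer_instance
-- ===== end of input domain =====

-- B replaces A's accumulating loop by six token counts combined in one closed-form weighted sum (alternative decomposition, same O(n) cost).


-- ===== PORT A =====
def HEX_DIRECTIONS : PySem.Dict String (Int × Int) :=
  PySem.Dict.mk [("nw", (0, -1)), ("ne", (1, -1)), ("w", (-1, 0)), ("e", (1, 0)), ("sw", (-1, 1)), ("se", (0, 1))]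

-- the dict lookup HEX_DIRECTIONS[direction] raises KeyError for unknown keys; Pre_ excludes those inputs, so getD's default is never used
def get_tile_coordinates (tile_directions : List String) : Int × Int :=
  tile_directions.foldl
    (fun xy direction =>
      let ij := PySem.Dict.getD HEX_DIRECTIONS direction (0, 0)
      (xy.1 + ij.1, xy.2 + ij.2))
    (0, 0)

-- ===== PORT B =====
def get_tile_coordinates_alt (tile_directions : List String) : Int × Int :=
  let ne : Int := PySem.List.count tile_directions "ne"
  let nw : Int := PySem.List.count tile_directions "nw"
  let se : Int := PySem.List.count tile_directions "se"
  let sw : Int := PySem.List.count tile_directions "sw"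
  let e : Int := PySem.List.count tile_directions "e"
  let w : Int := PySem.List.count tile_directions "w"
  (ne + e - w - sw, se + sw - nw - ne)

-- ===== PRECONDITION & SPEC =====
-- Pre_ excludes exactly the inputs on which A raises KeyError: lists with a token outside the six hex directions.
def Pre_get_tile_coordinates (tile_directions : List String) : Prop :=
  ∀ d ∈ tile_directions, d = "nw" ∨ d = "ne" ∨ d = "w" ∨ d = "e" ∨ d = "sw" ∨ d = "se"
instance (tile_directions : List String) : Decidable (Pre_get_tile_coordinates tile_directions) := by
  unfold Pre_get_tile_coordinates; infer_instance

def pvWitness_get_tile_coordinates : List String := ["se", "sw", "ne", "e", "e"]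

def Spec_get_tile_coordinates (tile_directions : List String) (out : Int × Int) : Prop := out = get_tile_coordinates_alt tile_directions
instance (tile_directions : List String) (out : Int × Int) : Decidable (Spec_get_tile_coordinates tile_directions out) := by unfold Spec_get_tile_coordinates; infer_instance

-- ===== CLAIM (what is proved, stated in full; the proofs are below) =====
def Claim_equal_get_tile_coordinates : Prop := ∀ (tile_directions : List String), Dom_get_tile_coordinates tile_directions → Pre_get_tile_coordinates tile_directions → Spec_get_tile_coordinates tile_directions (get_tile_coordinates tile_directions)

-- ===== LEMMAS AND PROOFS =====

-- The loop invariant: starting A's fold from (a, b) adds B's weighted count combination.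
lemma fold_eq (tile_directions : List String) (a b : Int)
    (h : Pre_get_tile_coordinates tile_directions) :
    tile_directions.foldl
      (fun xy direction =>
        let ij := PySem.Dict.getD HEX_DIRECTIONS direction (0, 0)
        (xy.1 + ij.1, xy.2 + ij.2))
      (a, b)
    = (a + ((PySem.List.count tile_directions "ne" : Int)
            + PySem.List.count tile_directions "e"
            - PySem.List.count tile_directions "w"
            - PySem.List.count tile_directions "sw"),
       b + ((PySem.List.count tile_directions "se" : Int)
            + PySem.List.count tile_directions "sw"
            - PySem.List.count tile_directions "nw"
            - PySem.List.count tile_directions "ne")) := by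
  induction tile_directions generalizing a b with
  | nil => simp [PySem.List.count]
  | cons d rest ih =>
    have hd := h d (by simp)
    have hrest : Pre_get_tile_coordinates rest := fun x hx => h x (by simp [hx])
    rcases hd with h1 | h1 | h1 | h1 | h1 | h1 <;>
      subst h1 <;>
      simp only [List.foldl_cons] <;>
      rw [ih _ _ hrest] <;>
      simp only [PySem.List.count, List.count_cons, HEX_DIRECTIONS, PySem.Dict.getD,
        PySem.Dict.get?_mk_cons, Prod.mk.injEq] <;>
      push_cast <;> norm_num <;> omega

-- ===== VERDICT (by name: the statement is the Claim_ definition above) =====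
theorem get_tile_coordinates_spec : Claim_equal_get_tile_coordinates := by
  intro tds _ hpre
  unfold Spec_get_tile_coordinates get_tile_coordinates get_tile_coordinates_alt
  rw [fold_eq tds 0 0 hpre]
  norm_num
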